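-- pv_equiv track=rewrite | github.com/PavelCernii/prg-basics | 04-Functions/7-15.py | f
-- ===== SOURCE A (Python) =====
-- def f(detector):
--     people = 0
--     people_max = 0
--
--     for char in detector:
--         if char == '+':
--             people += 1
--         elif char == '-':
--             people -= 1
--
--         people_max = max(people_max, people)
--
--     if people_max >= 3:
--         return True
--     else:
--         return False
-- ===== SOURCE B (Python) =====
-- def f(detector):
--     # Divide and conquer: for a segment return (total, best) where total is the
--     # sum of its +/- deltas and best is the max prefix sum (empty prefix = 0).
--     # Segments combine as (t1+t2, max(b1, t1+b2)).
--     def solve(lo, hi):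
--         if hi == lo:
--             return 0, 0
--         if hi - lo == 1:
--             c = detector[lo]
--             d = 1 if c == '+' else -1 if c == '-' else 0
--             return d, max(0, d)
--         mid = (lo + hi) // 2
--         t1, b1 = solve(lo, mid)
--         t2, b2 = solve(mid, hi)
--         return t1 + t2, max(b1, t1 + b2)
--     return solve(0, len(detector))[1] >= 3
-- ===== Notes on version B (the rewrite author's own statement) =====
-- stated objective: alternative
-- what changed: B replaces A's fused left-to-right counter+running-max loop with a divide-and-conquer that splits the string in halves and combines each half's (delta total, max prefix sum) pair as (t1+t2, max(b1, t1+b2)), then tests the root's max prefix against 3.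
import Mathlib
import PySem

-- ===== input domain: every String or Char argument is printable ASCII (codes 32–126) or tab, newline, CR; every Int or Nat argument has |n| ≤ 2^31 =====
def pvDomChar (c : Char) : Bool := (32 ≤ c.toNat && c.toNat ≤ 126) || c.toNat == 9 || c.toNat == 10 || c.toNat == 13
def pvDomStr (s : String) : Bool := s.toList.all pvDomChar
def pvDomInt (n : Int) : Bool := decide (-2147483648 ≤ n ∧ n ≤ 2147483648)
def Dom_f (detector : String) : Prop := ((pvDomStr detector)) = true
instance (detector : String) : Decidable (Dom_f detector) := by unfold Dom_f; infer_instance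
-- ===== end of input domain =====

-- B replaces A's fused counter+running-max loop with a divide-and-conquer over halves
-- combining (total, max prefix sum) pairs; same O(n) cost, different algorithm.

-- ===== PORT A =====
-- loop state: (people, people_max); after the loop, return people_max ≥ 3
def fA_go : List Char → Int → Int → Bool
  | [], _, peopleMax => decide (peopleMax ≥ 3)
  | c :: cs, people, peopleMax =>
      let people' := if c = '+' then people + 1 else if c = '-' then people - 1 else people
      fA_go cs people' (max peopleMax people')

def f (detector : String) : Bool := fA_go detector.toList 0 0

-- ===== PORT B =====
def fB_delta (c : Char) : Int := if c = '+' then 1 else if c = '-' then -1 else 0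

-- solve(lo, hi) of Source B, recursing on the segment (a sublist) itself
def fB_solve : List Char → Int × Int
  | [] => (0, 0)
  | [c] => (fB_delta c, max 0 (fB_delta c))
  | c1 :: c2 :: rest =>
      let cs := c1 :: c2 :: rest
      let m := cs.length / 2
      let r1 := fB_solve (cs.take m)
      let r2 := fB_solve (cs.drop m)
      (r1.1 + r2.1, max r1.2 (r1.1 + r2.2))
termination_by cs => cs.length
decreasing_by all_goals simp [List.length_take]; omega

def f_alt (detector : String) : Bool := decide ((fB_solve detector.toList).2 ≥ 3)

-- ===== PRECONDITION & SPEC =====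
def Spec_f (detector : String) (out : Bool) : Prop := out = f_alt detector
instance (detector : String) (out : Bool) : Decidable (Spec_f detector out) := by unfold Spec_f; infer_instance

-- ===== CLAIM =====
def Claim_equal_f : Prop := ∀ (detector : String), Dom_f detector → Spec_f detector (f detector)

-- ===== LEMMAS AND PROOFS =====
-- specification values: total delta and max prefix sum (over all prefixes, incl. empty)
def pvTot (cs : List Char) : Int := (cs.map fB_delta).sum

def pvBest : List Char → Int
  | [] => 0
  | c :: cs => max 0 (fB_delta c + pvBest cs)

theorem pvBest_nonneg (cs : List Char) : 0 ≤ pvBest cs := by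
  cases cs <;> simp [pvBest]

theorem pvTot_append (u v : List Char) : pvTot (u ++ v) = pvTot u + pvTot v := by
  simp [pvTot]

theorem pvBest_append (u v : List Char) :
    pvBest (u ++ v) = max (pvBest u) (pvTot u + pvBest v) := by
  induction u with
  | nil =>
      have := pvBest_nonneg v
      simp only [List.nil_append, pvBest, pvTot, List.map_nil, List.sum_nil]
      omega
  | cons c u ih =>
      simp only [List.cons_append, pvBest, ih, pvTot, List.map_cons, List.sum_cons]
      omega

theorem fB_solve_eq (cs : List Char) : fB_solve cs = (pvTot cs, pvBest cs) := by
  fun_induction fB_solve cs with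
  | case1 => simp [pvTot, pvBest]
  | case2 c =>
      have := pvBest_nonneg ([] : List Char)
      simp [pvTot, pvBest]
  | case3 c1 c2 rest cs m r1 r2 ih1 ih2 =>
      have h : cs.take m ++ cs.drop m = cs := List.take_append_drop m cs
      have ht := pvTot_append (cs.take m) (cs.drop m)
      have hb := pvBest_append (cs.take m) (cs.drop m)
      rw [h] at ht hb
      simp only [r1, r2, ih1, ih2, Prod.mk.injEq]
      exact ⟨ht.symm, hb.symm⟩

theorem fA_go_eq (cs : List Char) : ∀ (p pm : Int), p ≤ pm →
    fA_go cs p pm = decide (max pm (p + pvBest cs) ≥ 3) := by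
  induction cs with
  | nil =>
      intro p pm hle
      simp [fA_go, pvBest]
      omega
  | cons c cs ih =>
      intro p pm hle
      have hnn := pvBest_nonneg cs
      by_cases hp : c = '+'
      · subst hp
        simp only [fA_go, Char.reduceEq, if_true]
        rw [ih (p + 1) (max pm (p + 1)) (le_max_right _ _), decide_eq_decide]
        simp only [pvBest, fB_delta, if_true]
        omega
      · by_cases hm : c = '-'
        · subst hm
          simp only [fA_go, Char.reduceEq, if_false, if_true]
          rw [ih (p - 1) (max pm (p - 1)) (le_max_right _ _), decide_eq_decide]
          simp only [pvBest, fB_delta, Char.reduceEq, if_false, if_true]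
          omega
        · simp only [fA_go, if_neg hp, if_neg hm]
          rw [ih p (max pm p) (le_max_right _ _), decide_eq_decide]
          simp only [pvBest, fB_delta, if_neg hp, if_neg hm]
          omega

-- ===== VERDICT =====
theorem f_spec : Claim_equal_f := by
  intro detector _
  unfold Spec_f f f_alt
  rw [fA_go_eq _ 0 0 le_rfl, fB_solve_eq, decide_eq_decide]
  have := pvBest_nonneg detector.toList
  omega
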